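-- pv_equiv track=rewrite | github.com/mikel-brostrom/boxmot | boxmot/trackers/ocsort/ocsort.py | k_previous_obs
-- ===== SOURCE A (Python) =====
-- def k_previous_obs(observations, cur_age, k, is_obb=False):
--     if len(observations) == 0:
--         if is_obb:
--             return [-1, -1, -1, -1, -1, -1]
--         else :
--             return [-1, -1, -1, -1, -1]
--     for i in range(k):
--         dt = k - i
--         if cur_age - dt in observations:
--             return observations[cur_age - dt]
--     max_age = max(observations.keys())
--     return observations[max_age]
-- ===== SOURCE B (Python) =====
-- def k_previous_obs(observations, cur_age, k, is_obb=False):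
--     if not observations:
--         return [-1] * (6 if is_obb else 5)
--     window = [age for age in observations if cur_age - k <= age <= cur_age - 1]
--     if window:
--         return observations[min(window)]
--     return observations[max(observations)]
-- ===== Notes on version B (the rewrite author's own statement) =====
-- stated objective: simpler
-- what changed: Replaces the ordered k-probe loop (testing ages cur_age-k..cur_age-1 one by one against the dict) by a single filter of the dict's keys to the inclusive window [cur_age-k, cur_age-1] followed by min(), falling back to the newest key when the window is empty.
import Mathlib
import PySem

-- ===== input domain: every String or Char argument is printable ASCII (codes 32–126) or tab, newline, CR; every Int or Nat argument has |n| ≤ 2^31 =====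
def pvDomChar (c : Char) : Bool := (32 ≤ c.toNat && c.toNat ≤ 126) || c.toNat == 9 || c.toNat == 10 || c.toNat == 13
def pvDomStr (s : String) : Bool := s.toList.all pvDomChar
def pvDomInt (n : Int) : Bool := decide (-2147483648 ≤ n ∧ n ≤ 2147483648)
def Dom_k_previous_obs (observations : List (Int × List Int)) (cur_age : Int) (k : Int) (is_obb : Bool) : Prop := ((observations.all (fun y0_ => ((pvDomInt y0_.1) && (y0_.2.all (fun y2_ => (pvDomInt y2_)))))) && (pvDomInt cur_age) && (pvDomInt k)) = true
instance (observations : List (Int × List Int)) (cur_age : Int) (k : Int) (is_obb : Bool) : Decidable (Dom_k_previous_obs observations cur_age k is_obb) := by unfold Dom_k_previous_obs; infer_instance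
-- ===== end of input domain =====

-- B replaces A's ordered k-probe loop by filtering the dict keys to the window
-- [cur_age-k, cur_age-1] and taking the minimum (objective: simpler, single key pass).

-- ===== PORT A =====
-- A's for-loop with early return: first i in range(k) whose age cur_age-(k-i) is a key.
def kpoScan (d : PySem.Dict Int (List Int)) (cur_age : Int) (k : Int) : Option (List Int) :=
  (PySem.List.pyRange 0 k 1).findSome? (fun i => d.get? (cur_age - (k - i)))

def k_previous_obs (observations : List (Int × List Int)) (cur_age : Int) (k : Int) (is_obb : Bool) : List Int :=
  if observations.length = 0 then
    if is_obb then [-1, -1, -1, -1, -1, -1] else [-1, -1, -1, -1, -1]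
  else
    match kpoScan (PySem.Dict.ofList observations) cur_age k with
    | some v => v
    | none =>
      match PySem.List.max? (PySem.Dict.ofList observations).keys (fun y => y) with
      | some max_age => ((PySem.Dict.ofList observations).get? max_age).getD []
      | none => []  -- unreachable: observations is nonempty

-- ===== PORT B =====
def k_previous_obs_alt (observations : List (Int × List Int)) (cur_age : Int) (k : Int) (is_obb : Bool) : List Int :=
  if observations.isEmpty then
    if is_obb then [-1, -1, -1, -1, -1, -1] else [-1, -1, -1, -1, -1]
  else
    match PySem.List.min? ((PySem.Dict.ofList observations).keys.filter
        (fun a => decide (cur_age - k ≤ a) && decide (a ≤ cur_age - 1))) (fun y => y) with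
    | some a => ((PySem.Dict.ofList observations).get? a).getD []
    | none =>
      match PySem.List.max? (PySem.Dict.ofList observations).keys (fun y => y) with
      | some m => ((PySem.Dict.ofList observations).get? m).getD []
      | none => []  -- unreachable: observations is nonempty

-- ===== PRECONDITION & SPEC =====
def Spec_k_previous_obs (observations : List (Int × List Int)) (cur_age : Int) (k : Int) (is_obb : Bool) (out : List Int) : Prop := out = k_previous_obs_alt observations cur_age k is_obb
instance (observations : List (Int × List Int)) (cur_age : Int) (k : Int) (is_obb : Bool) (out : List Int) : Decidable (Spec_k_previous_obs observations cur_age k is_obb out) := by unfold Spec_k_previous_obs; infer_instance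

-- ===== CLAIM (what is proved, stated in full; the proofs are below) =====
def Claim_equal_k_previous_obs : Prop := ∀ (observations : List (Int × List Int)) (cur_age : Int) (k : Int) (is_obb : Bool), Dom_k_previous_obs observations cur_age k is_obb → Spec_k_previous_obs observations cur_age k is_obb (k_previous_obs observations cur_age k is_obb)

-- ===== LEMMAS AND PROOFS =====

lemma foldl_min_mem (t : List Int) (x : Int) : t.foldl min x ∈ x :: t := by
  induction t generalizing x with
  | nil => simp
  | cons a t ih =>
    simp only [List.foldl_cons]
    have h := ih (min x a)
    rcases List.mem_cons.mp h with h1 | h1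
    · rw [h1]
      rcases min_choice x a with h2 | h2 <;> rw [h2] <;> simp
    · simp [h1]

lemma foldl_min_le (t : List Int) (x : Int) : ∀ y ∈ x :: t, t.foldl min x ≤ y := by
  induction t generalizing x with
  | nil => simp
  | cons a t ih =>
    intro y hy
    simp only [List.foldl_cons]
    rcases List.mem_cons.mp hy with h1 | hy'
    · rw [h1]
      exact (ih (min x a) _ (by simp)).trans (min_le_left x a)
    · rcases List.mem_cons.mp hy' with h2 | hy''
      · rw [h2]
        exact (ih (min x a) _ (by simp)).trans (min_le_right x a)
      · exact ih (min x a) _ (List.mem_cons_of_mem _ hy'')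

lemma min?_id_of (xs : List Int) (m : Int) (hm : m ∈ xs) (hall : ∀ y ∈ xs, m ≤ y) :
    PySem.List.min? xs (fun y => y) = some m := by
  cases xs with
  | nil => simp at hm
  | cons x t =>
    rw [PySem.List.min?_id_cons]
    have h1 : t.foldl min x ≤ m := foldl_min_le t x m hm
    have h2 : m ≤ t.foldl min x := hall _ (foldl_min_mem t x)
    exact congrArg some (le_antisymm h1 h2)

lemma findSome?_get?_eq_bind (d : PySem.Dict Int (List Int)) (L : List Int) :
    L.findSome? (fun a => d.get? a)
      = (L.find? (fun a => d.contains a)).bind (fun a => d.get? a) := by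
  induction L with
  | nil => rfl
  | cons a t ih =>
    rw [List.findSome?_cons, List.find?_cons]
    rw [PySem.Dict.contains_eq_isSome_get?]
    cases h : d.get? a with
    | some v => simp [h]
    | none => simpa [h] using ih

lemma find_contains_eq_min (d : PySem.Dict Int (List Int)) (hi : Int) :
    ∀ (n : Nat) (lo : Int), (hi - lo).toNat = n →
      (PySem.List.pyRange lo hi 1).find? (fun a => d.contains a)
        = PySem.List.min? (d.keys.filter (fun a => decide (lo ≤ a) && decide (a ≤ hi - 1))) (fun y => y) := by
  intro n
  induction n with
  | zero =>
    intro lo hn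
    have hle : hi ≤ lo := by omega
    rw [PySem.List.pyRange_one_eq_nil hle]
    have hf : d.keys.filter (fun a => decide (lo ≤ a) && decide (a ≤ hi - 1)) = [] := by
      apply List.filter_eq_nil_iff.mpr
      intro a _
      simp only [Bool.and_eq_true, decide_eq_true_eq, not_and]
      omega
    rw [hf, List.find?_nil]
    rfl
  | succ n ih =>
    intro lo hn
    have hlt : lo < hi := by omega
    rw [PySem.List.pyRange_one_cons hlt, List.find?_cons]
    cases hc : d.contains lo with
    | true =>
      have hmem : lo ∈ d.keys := (PySem.Dict.contains_iff_mem_keys _ _).mp hc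
      simp only [hc]
      symm
      apply min?_id_of
      · exact List.mem_filter.mpr ⟨hmem, by simp; omega⟩
      · intro y hy
        have := (List.mem_filter.mp hy).2
        simp only [Bool.and_eq_true, decide_eq_true_eq] at this
        omega
    | false =>
      simp only [hc]
      rw [ih (lo + 1) (by omega)]
      congr 1
      apply List.filter_congr
      intro a ha
      have hne : a ≠ lo := by
        intro h
        rw [h] at ha
        exact absurd ((PySem.Dict.contains_iff_mem_keys _ _).mpr ha) (by simp [hc])
      rw [show (decide (lo ≤ a)) = (decide (lo + 1 ≤ a)) from by
        simp only [decide_eq_decide]; omega]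

lemma kpoScan_eq (d : PySem.Dict Int (List Int)) (c k : Int) :
    kpoScan d c k
      = ((PySem.List.pyRange (c - k) c 1).find? (fun a => d.contains a)).bind (fun a => d.get? a) := by
  unfold kpoScan
  rw [← findSome?_get?_eq_bind]
  rw [PySem.List.pyRange_one 0 k, PySem.List.pyRange_one (c - k) c, List.findSome?_map, List.findSome?_map]
  have hlen : (k - 0).toNat = (c - (c - k)).toNat := by omega
  rw [hlen]
  congr 1
  funext j
  show (PySem.Dict.get? d (c - (k - (0 + (j : Int))))) = PySem.Dict.get? d (c - k + (j : Int))
  congr 1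
  omega

-- ===== VERDICT (by name: the statement is the Claim_ definition above) =====
theorem k_previous_obs_spec : Claim_equal_k_previous_obs := by
  intro observations cur_age k is_obb _
  unfold Spec_k_previous_obs k_previous_obs k_previous_obs_alt
  cases observations with
  | nil => simp
  | cons p rest =>
    rw [if_neg (by simp : ¬ ((p :: rest).length = 0)), if_neg (by simp : ¬ ((p :: rest).isEmpty = true))]
    rw [kpoScan_eq]
    rw [find_contains_eq_min (PySem.Dict.ofList (p :: rest)) cur_age (cur_age - (cur_age - k)).toNat (cur_age - k) rfl]
    cases hmin : PySem.List.min? ((PySem.Dict.ofList (p :: rest)).keys.filter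
        (fun a => decide (cur_age - k ≤ a) && decide (a ≤ cur_age - 1))) (fun y => y) with
    | none => simp
    | some a =>
      have ha := PySem.List.min?_mem hmin
      have hmemk : a ∈ (PySem.Dict.ofList (p :: rest)).keys := (List.mem_filter.mp ha).1
      have hc : (PySem.Dict.ofList (p :: rest)).contains a = true :=
        (PySem.Dict.contains_iff_mem_keys _ _).mpr hmemk
      rw [PySem.Dict.contains_eq_isSome_get?] at hc
      cases hg : (PySem.Dict.ofList (p :: rest)).get? a with
      | none => rw [hg] at hc; simp at hc
      | some v => simp [hg]
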